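-- pv_equiv track=rewrite | github.com/thakurpranjalraghav/Coding-Learner | Multiple_occurrences.py | calculate_index_difference
-- ===== SOURCE A (Python) =====
-- def calculate_index_difference(n, arr):
--     first_occurrence = {}
--     last_occurrence = {}
--
--     # Identify first and last occurrence of each element
--     for i, num in enumerate(arr):
--         if num not in first_occurrence:
--             first_occurrence[num] = i  # Store first occurrence
--         last_occurrence[num] = i  # Always update last occurrence
--
--     # Calculate sum of absolute differences
--     total_sum = sum(abs(last_occurrence[num] - first_occurrence[num]) for num in first_occurrence)
--
--     return total_sum
-- ===== SOURCE B (Python) =====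
-- def calculate_index_difference(n, arr):
--     total = 0
--     for i, x in enumerate(arr):
--         if x not in arr[i + 1:]:
--             total += i
--         if x not in arr[:i]:
--             total -= i
--     return total
-- ===== Notes on version B (the rewrite author's own statement) =====
-- stated objective: alternative
-- what changed: Drops A's two occurrence dicts entirely: B makes one pass over enumerate(arr), adding i when arr[i] is a last occurrence (value absent from arr[i+1:]) and subtracting i when it is a first occurrence (absent from arr[:i]); sum of last-occurrence indices minus sum of first-occurrence indices equals A's total, trading A's O(n) hashing for O(n^2) slice membership tests with no auxiliary state.
import Mathlib
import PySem

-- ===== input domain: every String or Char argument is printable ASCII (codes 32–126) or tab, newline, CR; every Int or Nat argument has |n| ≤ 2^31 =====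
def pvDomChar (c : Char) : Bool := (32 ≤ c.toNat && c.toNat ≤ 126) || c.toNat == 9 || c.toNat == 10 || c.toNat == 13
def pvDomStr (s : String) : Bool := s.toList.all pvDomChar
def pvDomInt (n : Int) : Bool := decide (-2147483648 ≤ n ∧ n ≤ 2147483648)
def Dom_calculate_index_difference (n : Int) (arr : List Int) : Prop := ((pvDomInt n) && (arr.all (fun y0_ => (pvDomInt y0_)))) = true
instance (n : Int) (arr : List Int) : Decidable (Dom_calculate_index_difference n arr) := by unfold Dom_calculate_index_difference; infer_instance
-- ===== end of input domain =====

-- B drops A's two occurrence dicts: one pass over enumerate(arr) adds i when arr[i] is a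
-- last occurrence (value absent from arr[i+1:]) and subtracts i when it is a first
-- occurrence (absent from arr[:i]); objective: alternative (no auxiliary state, O(n^2) scans).

-- ===== PORT A =====
def calculate_index_difference (n : Int) (arr : List Int) : Int :=
  let st := (PySem.List.enumerate arr 0).foldl
    (fun (st : PySem.Dict Int Int × PySem.Dict Int Int) p =>
      let fo := if st.1.contains p.2 then st.1 else st.1.insert p.2 p.1
      (fo, st.2.insert p.2 p.1))
    (PySem.Dict.empty, PySem.Dict.empty)
  -- sum(abs(last_occurrence[num] - first_occurrence[num]) for num in first_occurrence);
  -- getD with default 0 stands for d[num]: every key of first_occurrence is in both dicts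
  ((st.1.keys).map (fun num => |st.2.getD num 0 - st.1.getD num 0|)).sum

-- ===== PORT B =====
def calculate_index_difference_alt (n : Int) (arr : List Int) : Int :=
  (PySem.List.enumerate arr 0).foldl
    (fun total p =>
      let t1 := if (PySem.List.slice arr (some (p.1 + 1)) none).contains p.2 then total
                else total + p.1
      if (PySem.List.slice arr none (some p.1)).contains p.2 then t1 else t1 - p.1)
    0

-- ===== PRECONDITION & SPEC =====
def Spec_calculate_index_difference (n : Int) (arr : List Int) (out : Int) : Prop := out = calculate_index_difference_alt n arr
instance (n : Int) (arr : List Int) (out : Int) : Decidable (Spec_calculate_index_difference n arr out) := by unfold Spec_calculate_index_difference; infer_instance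

-- ===== CLAIM (what is proved, stated in full; the proofs are below) =====
def Claim_equal_calculate_index_difference : Prop := ∀ (n : Int) (arr : List Int), Dom_calculate_index_difference n arr → Spec_calculate_index_difference n arr (calculate_index_difference n arr)

-- ===== LEMMAS AND PROOFS =====

-- A's loop body, with the first-seen branch folded into Dict.setdefault
def pvStepA (st : PySem.Dict Int Int × PySem.Dict Int Int) (p : Int × Int) :
    PySem.Dict Int Int × PySem.Dict Int Int :=
  (st.1.setdefault p.2 p.1, st.2.insert p.2 p.1)

-- the list of indices at which k occurs, in increasing order
def pvOcc (arr : List Int) (k : Int) : List Int :=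
  ((PySem.List.enumerate arr 0).filter (fun p => p.2 == k)).map (fun p => p.1)

-- per-position contribution of B, phrased over the occurrence list of the value
def pvContrib (o : List Int) (j : Int) : Int :=
  (if ∃ j' ∈ o, j < j' then 0 else j) - (if ∃ j' ∈ o, j' < j then 0 else j)

lemma foldA_eq (l : List (Int × Int)) (st : PySem.Dict Int Int × PySem.Dict Int Int) :
    l.foldl
      (fun (st : PySem.Dict Int Int × PySem.Dict Int Int) p =>
        let fo := if st.1.contains p.2 then st.1 else st.1.insert p.2 p.1
        (fo, st.2.insert p.2 p.1)) st
    = l.foldl pvStepA st := by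
  induction l generalizing st with
  | nil => rfl
  | cons p t ih =>
    rw [List.foldl_cons, List.foldl_cons]
    have hstep : (let fo := if st.1.contains p.2 then st.1 else st.1.insert p.2 p.1
        (fo, st.2.insert p.2 p.1)) = pvStepA st p := by
      by_cases h : st.1.contains p.2 = true
      · simp only [pvStepA, h, if_pos, PySem.Dict.setdefault_of_contains st.1 p.1 h]
      · have h' : st.1.contains p.2 = false := by simpa using h
        simp [pvStepA, h', PySem.Dict.setdefault_of_not_contains st.1 p.1 h']
    rw [hstep, ih]

lemma foldA_fst_getD (l : List (Int × Int)) (fo lo : PySem.Dict Int Int) (k : Int) :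
    (l.foldl pvStepA (fo, lo)).1.getD k 0 =
      if fo.contains k = true then fo.getD k 0
      else ((l.filter (fun p => p.2 == k)).map (fun p => p.1)).headD 0 := by
  induction l generalizing fo lo with
  | nil =>
    by_cases h : fo.contains k = true
    · simp [h]
    · have h' : fo.contains k = false := by simpa using h
      simp [h', PySem.Dict.getD_of_not_contains fo 0 h']
  | cons p t ih =>
    rw [List.foldl_cons]
    show (t.foldl pvStepA (fo.setdefault p.2 p.1, lo.insert p.2 p.1)).1.getD k 0 = _
    rw [ih]
    by_cases hk : k = p.2
    · subst hk
      have hc : (fo.setdefault p.2 p.1).contains p.2 = true := by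
        simp [PySem.Dict.contains_setdefault]
      rw [if_pos hc, PySem.Dict.getD_setdefault_self]
      simp only [List.filter_cons, beq_self_eq_true, if_pos, List.map_cons, List.headD_cons]
      by_cases h : fo.contains p.2 = true
      · obtain ⟨v, hv⟩ : ∃ v, fo.get? p.2 = some v := by
          cases hg : fo.get? p.2 with
          | none => rw [(PySem.Dict.get?_eq_none_iff_contains fo p.2).mp hg] at h; cases h
          | some v => exact ⟨v, rfl⟩
        rw [if_pos h, PySem.Dict.getD_of_get?_eq_some _ _ hv, PySem.Dict.getD_of_get?_eq_some _ _ hv]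
      · have h' : fo.contains p.2 = false := by simpa using h
        rw [if_neg h, PySem.Dict.getD_of_not_contains fo p.1 h']
    · have hne : (p.2 == k) = false := by
        simp only [beq_eq_false_iff_ne, ne_eq]
        exact fun h => hk h.symm
      have hc : (fo.setdefault p.2 p.1).contains k = fo.contains k := by
        simp [PySem.Dict.contains_setdefault, hk]
      have hg : (fo.setdefault p.2 p.1).getD k 0 = fo.getD k 0 := by
        rw [PySem.Dict.getD_eq_get?_getD, PySem.Dict.get?_setdefault_of_ne fo p.1 hk,
          ← PySem.Dict.getD_eq_get?_getD]
      have hf : (p :: t).filter (fun p => p.2 == k) = t.filter (fun p => p.2 == k) := by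
        simp [hne]
      rw [hc, hg, hf]

lemma foldA_snd_getD (l : List (Int × Int)) (fo lo : PySem.Dict Int Int) (k : Int) :
    (l.foldl pvStepA (fo, lo)).2.getD k 0 =
      ((l.filter (fun p => p.2 == k)).map (fun p => p.1)).getLastD (lo.getD k 0) := by
  induction l generalizing fo lo with
  | nil => rfl
  | cons p t ih =>
    rw [List.foldl_cons]
    show (t.foldl pvStepA (fo.setdefault p.2 p.1, lo.insert p.2 p.1)).2.getD k 0 = _
    rw [ih]
    by_cases hk : k = p.2
    · subst hk
      simp only [List.filter_cons, beq_self_eq_true, if_pos, List.map_cons, List.getLastD_cons,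
        PySem.Dict.getD_insert_self]
    · have hne : (p.2 == k) = false := by
        simp only [beq_eq_false_iff_ne, ne_eq]
        exact fun h => hk h.symm
      have hf : (p :: t).filter (fun p => p.2 == k) = t.filter (fun p => p.2 == k) := by
        simp [hne]
      rw [hf, PySem.Dict.getD_insert_of_ne lo p.1 0 hk]

lemma foldA_fst_keys (l : List (Int × Int)) (fo lo : PySem.Dict Int Int) :
    (l.foldl pvStepA (fo, lo)).1.keys = PySem.Set.update fo.keys (l.map (fun p => p.2)) := by
  induction l generalizing fo lo with
  | nil => simp [PySem.Set.update]
  | cons p t ih =>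
    rw [List.foldl_cons, List.map_cons, PySem.Set.update_cons]
    show (t.foldl pvStepA (fo.setdefault p.2 p.1, lo.insert p.2 p.1)).1.keys = _
    rw [ih]
    congr 1
    rw [PySem.Dict.keys_setdefault]
    by_cases h : fo.contains p.2 = true
    · rw [if_pos h, PySem.Set.add_of_mem ((PySem.Dict.contains_iff_mem_keys fo p.2).mp h)]
    · rw [if_neg h, PySem.Set.add_of_not_mem
        (fun hm => h ((PySem.Dict.contains_iff_mem_keys fo p.2).mpr hm))]

lemma pvOcc_pairwise (arr : List Int) (k : Int) : (pvOcc arr k).Pairwise (· < ·) := by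
  unfold pvOcc
  rw [List.pairwise_map]
  exact (PySem.List.pairwise_lt_enumerate arr 0).filter _

lemma pvOcc_ne_nil (arr : List Int) (k : Int) (h : k ∈ arr) : pvOcc arr k ≠ [] := by
  unfold pvOcc
  rw [← PySem.List.map_snd_enumerate arr 0] at h
  obtain ⟨p, hp, hpk⟩ := List.mem_map.mp h
  intro hnil
  rw [List.map_eq_nil_iff, List.filter_eq_nil_iff] at hnil
  exact hnil p hp (by simp [hpk])

lemma mem_pvOcc (arr : List Int) (k j : Int) :
    j ∈ pvOcc arr k ↔ ∃ (m : Nat) (h : m < arr.length), j = (m : Int) ∧ arr[m] = k := by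
  unfold pvOcc
  constructor
  · intro hj
    obtain ⟨p, hp, hj⟩ := List.mem_map.mp hj
    obtain ⟨hpe, hpk⟩ := List.mem_filter.mp hp
    obtain ⟨m, hm, hpm⟩ := (PySem.List.mem_enumerate_iff _ _ _).mp hpe
    subst hpm
    exact ⟨m, hm, by simpa using hj.symm, by simpa using hpk⟩
  · rintro ⟨m, hm, rfl, hk⟩
    refine List.mem_map.mpr ⟨((m : Int), arr[m]), List.mem_filter.mpr ⟨?_, by simp [hk]⟩, rfl⟩
    exact (PySem.List.mem_enumerate_iff _ _ _).mpr ⟨m, hm, by simp⟩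

lemma mem_take_iff_occ (arr : List Int) (v : Int) (k : Nat) :
    v ∈ arr.take k ↔ ∃ j ∈ pvOcc arr v, j < (k : Int) := by
  constructor
  · intro h
    obtain ⟨m, hm, hv⟩ := List.mem_iff_getElem.mp h
    rw [List.getElem_take] at hv
    have hlen : m < arr.length := lt_of_lt_of_le hm (by simpa using List.length_take_le k arr)
    have hmk : m < k := lt_of_lt_of_le hm (by simp)
    exact ⟨(m : Int), (mem_pvOcc arr v (m : Int)).mpr ⟨m, hlen, rfl, hv⟩, by exact_mod_cast hmk⟩
  · rintro ⟨j, hj, hlt⟩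
    obtain ⟨m, hm, rfl, hv⟩ := (mem_pvOcc arr v j).mp hj
    have hmk : m < k := by exact_mod_cast hlt
    exact List.mem_iff_getElem.mpr ⟨m, by simp [hm, hmk], by rw [List.getElem_take]; exact hv⟩

lemma mem_drop_iff_occ (arr : List Int) (v : Int) (k : Nat) :
    v ∈ arr.drop (k + 1) ↔ ∃ j ∈ pvOcc arr v, (k : Int) < j := by
  rw [List.mem_drop_iff_getElem]
  constructor
  · rintro ⟨m, hm, hv⟩
    refine ⟨(((k + 1) + m : Nat) : Int), (mem_pvOcc arr v _).mpr ⟨(k + 1) + m, by omega, rfl, hv⟩, ?_⟩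
    exact_mod_cast by omega
  · rintro ⟨j, hj, hlt⟩
    obtain ⟨m, hm, rfl, hv⟩ := (mem_pvOcc arr v j).mp hj
    have hkm : k + 1 ≤ m := by exact_mod_cast hlt
    refine ⟨m - (k + 1), by omega, ?_⟩
    convert hv using 2
    omega

lemma sum_map_sub_int (l : List Int) (f g : Int → Int) :
    (l.map (fun x => f x - g x)).sum = (l.map f).sum - (l.map g).sum := by
  induction l with
  | nil => simp
  | cons x t ih => simp [ih]; ring

lemma sum_map_filter_add (l : List (Int × Int)) (g : Int × Int → Int) (P : Int × Int → Bool) :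
    (l.map g).sum = ((l.filter P).map g).sum + ((l.filter (fun p => !P p)).map g).sum := by
  induction l with
  | nil => simp
  | cons p t ih =>
    by_cases h : P p = true
    · simp [h, ih]; ring
    · have h' : P p = false := by simpa using h
      simp [h', ih]; ring

lemma sum_fiber (K : List Int) (l : List (Int × Int)) (g : Int × Int → Int)
    (hnd : K.Nodup) (hall : ∀ p ∈ l, p.2 ∈ K) :
    (l.map g).sum = (K.map (fun v => ((l.filter (fun p => p.2 == v)).map g).sum)).sum := by
  induction K generalizing l with
  | nil =>
    have : l = [] := List.eq_nil_iff_forall_not_mem.mpr (fun p hp => by simpa using hall p hp)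
    simp [this]
  | cons v K' ih =>
    rw [List.map_cons, List.sum_cons,
      sum_map_filter_add l g (fun p => p.2 == v)]
    congr 1
    have hnd' : K'.Nodup := (List.nodup_cons.mp hnd).2
    have hvK' : v ∉ K' := (List.nodup_cons.mp hnd).1
    rw [ih (l.filter (fun p => !(p.2 == v))) hnd' ?_]
    · apply congrArg
      apply List.map_congr_left
      intro v' hv'
      congr 1
      rw [List.filter_filter]
      congr 1
      apply List.filter_congr
      intro p _
      by_cases h : p.2 = v'
      · have : (p.2 == v) = false := by
          simp only [beq_eq_false_iff_ne, ne_eq, h]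
          exact fun he => hvK' (he ▸ hv')
        simp [h, this]
        exact fun he => hvK' (he ▸ hv')
      · simp [h]
    · intro p hp
      obtain ⟨hpl, hpv⟩ := List.mem_filter.mp hp
      have := hall p hpl
      rcases List.mem_cons.mp this with h | h
      · exact absurd h (by simpa using hpv)
      · exact h

lemma sum_last_selector (o : List Int) (hpw : o.Pairwise (· < ·)) :
    (o.map (fun j => if ∃ j' ∈ o, j < j' then 0 else j)).sum = o.getLastD 0 := by
  induction o with
  | nil => simp
  | cons j0 t ih =>
    obtain ⟨hj0, hpt⟩ := List.pairwise_cons.mp hpw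
    rw [List.map_cons, List.sum_cons, List.getLastD_cons]
    have hmap : (t.map (fun j => if ∃ j' ∈ j0 :: t, j < j' then 0 else j))
        = t.map (fun j => if ∃ j' ∈ t, j < j' then 0 else j) := by
      apply List.map_congr_left
      intro j hj
      have hj0j : j0 < j := hj0 j hj
      by_cases h : ∃ j' ∈ t, j < j'
      · obtain ⟨j', hj', hlt⟩ := h
        rw [if_pos ⟨j', List.mem_cons_of_mem _ hj', hlt⟩, if_pos ⟨j', hj', hlt⟩]
      · have h' : ¬ ∃ j' ∈ j0 :: t, j < j' := by
          rintro ⟨j', hj', hlt⟩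
          rcases List.mem_cons.mp hj' with rfl | hm
          · omega
          · exact h ⟨j', hm, hlt⟩
        rw [if_neg h', if_neg h]
    rw [hmap, ih hpt]
    cases t with
    | nil => simp
    | cons x t' =>
      have hx : ∃ j' ∈ j0 :: x :: t', j0 < j' :=
        ⟨x, List.mem_cons_of_mem _ List.mem_cons_self, hj0 x List.mem_cons_self⟩
      rw [if_pos hx, zero_add, List.getLastD_cons, List.getLastD_cons]

lemma sum_first_selector (o : List Int) (hpw : o.Pairwise (· < ·)) :
    (o.map (fun j => if ∃ j' ∈ o, j' < j then 0 else j)).sum = o.headD 0 := by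
  cases o with
  | nil => simp
  | cons j0 t =>
    obtain ⟨hj0, _⟩ := List.pairwise_cons.mp hpw
    rw [List.map_cons, List.sum_cons, List.headD_cons]
    have h0 : ¬ ∃ j' ∈ j0 :: t, j' < j0 := by
      rintro ⟨j', hj', hlt⟩
      rcases List.mem_cons.mp hj' with rfl | hm
      · omega
      · exact absurd hlt (by have := hj0 j' hm; omega)
    rw [if_neg h0]
    have hz : (t.map (fun j => if ∃ j' ∈ j0 :: t, j' < j then 0 else j)) = t.map (fun _ => (0 : Int)) := by
      apply List.map_congr_left
      intro j hj
      exact if_pos ⟨j0, List.mem_cons_self, hj0 j hj⟩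
    rw [hz]
    simp

lemma sum_contrib (o : List Int) (hpw : o.Pairwise (· < ·)) :
    (o.map (pvContrib o)).sum = o.getLastD 0 - o.headD 0 := by
  unfold pvContrib
  rw [sum_map_sub_int, sum_last_selector o hpw, sum_first_selector o hpw]

lemma le_getLastD (t : List Int) (j : Int) : ∀ (d : Int), (∀ x ∈ t, j < x) → j ≤ d →
    j ≤ t.getLastD d := by
  induction t with
  | nil => intro d _ hd; exact hd
  | cons x t ih =>
    intro d h _
    rw [List.getLastD_cons]
    exact ih x (fun y hy => h y (List.mem_cons_of_mem _ hy)) (le_of_lt (h x (List.mem_cons_self)))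

lemma head_le_last (arr : List Int) (k : Int) (h : k ∈ arr) :
    (pvOcc arr k).headD 0 ≤ (pvOcc arr k).getLastD 0 := by
  obtain ⟨j, t, ht⟩ : ∃ j t, pvOcc arr k = j :: t := by
    cases hc : pvOcc arr k with
    | nil => exact absurd hc (pvOcc_ne_nil arr k h)
    | cons j t => exact ⟨j, t, rfl⟩
  have hp : ∀ x ∈ t, j < x := by
    have hpw := pvOcc_pairwise arr k
    rw [ht, List.pairwise_cons] at hpw
    exact hpw.1
  rw [ht, List.getLastD_cons, List.headD_cons]
  exact le_getLastD t j j hp le_rfl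

-- B's fold equals the fiberwise sum of pvContrib over the occurrence lists
lemma foldB_characterization (arr : List Int) :
    calculate_index_difference_alt 0 arr
      = ((PySem.Set.ofList arr).map
          (fun v => ((pvOcc arr v).map (pvContrib (pvOcc arr v))).sum)).sum := by
  unfold calculate_index_difference_alt
  have hbody : ((PySem.List.enumerate arr 0).foldl
      (fun total p =>
        let t1 := if (PySem.List.slice arr (some (p.1 + 1)) none).contains p.2 then total
                  else total + p.1
        if (PySem.List.slice arr none (some p.1)).contains p.2 then t1 else t1 - p.1)
      0)
      = ((PySem.List.enumerate arr 0).foldl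
      (fun total p => total +
        ((if (PySem.List.slice arr (some (p.1 + 1)) none).contains p.2 then 0 else p.1)
          - (if (PySem.List.slice arr none (some p.1)).contains p.2 then 0 else p.1)))
      0) := by
    apply PySem.List.foldl_congr_mem
    intro total p _
    dsimp only
    split_ifs <;> ring
  rw [hbody, PySem.List.foldl_add, zero_add,
    sum_fiber (PySem.Set.ofList arr) (PySem.List.enumerate arr 0) _
      (PySem.Set.nodup_ofList arr) ?hall]
  case hall =>
    intro p hp
    refine (PySem.Set.mem_ofList arr p.2).mpr ?_
    rw [← PySem.List.map_snd_enumerate arr 0]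
    exact List.mem_map_of_mem hp
  apply congrArg
  apply List.map_congr_left
  intro v hv
  have hfiber : ∀ p ∈ (PySem.List.enumerate arr 0).filter (fun p => p.2 == v),
      ((if (PySem.List.slice arr (some (p.1 + 1)) none).contains p.2 then 0 else p.1)
        - (if (PySem.List.slice arr none (some p.1)).contains p.2 then 0 else p.1))
      = pvContrib (pvOcc arr v) p.1 := by
    intro p hp
    obtain ⟨hpe, hpv⟩ := List.mem_filter.mp hp
    have hpv' : p.2 = v := by simpa using hpv
    obtain ⟨k, hk, hpk⟩ := (PySem.List.mem_enumerate_iff _ _ _).mp hpe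
    have hp1 : p.1 = (k : Int) := by rw [hpk]; simp
    have hs1 : PySem.List.slice arr (some (p.1 + 1)) none = arr.drop (k + 1) := by
      rw [hp1]
      have : (k : Int) + 1 = ((k + 1 : Nat) : Int) := by push_cast; ring
      rw [this, PySem.List.slice_from_natCast]
    have hs2 : PySem.List.slice arr none (some p.1) = arr.take k := by
      rw [hp1, PySem.List.slice_to_natCast]
    have h1 : ((arr.drop (k + 1)).contains v = true) ↔ ∃ j ∈ pvOcc arr v, (k : Int) < j := by
      rw [List.contains_iff_mem]; exact mem_drop_iff_occ arr v k
    have h2 : ((arr.take k).contains v = true) ↔ ∃ j ∈ pvOcc arr v, j < (k : Int) := by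
      rw [List.contains_iff_mem]; exact mem_take_iff_occ arr v k
    rw [hs1, hs2, hpv', hp1]
    unfold pvContrib
    simp only [h1, h2]
  rw [List.map_congr_left hfiber]
  show _ = ((((PySem.List.enumerate arr 0).filter (fun p => p.2 == v)).map
      (fun p => p.1)).map (pvContrib (pvOcc arr v))).sum
  rw [List.map_map]
  rfl

lemma A_characterization (arr : List Int) :
    calculate_index_difference 0 arr
      = ((PySem.Set.ofList arr).map
          (fun v => |(pvOcc arr v).getLastD 0 - (pvOcc arr v).headD 0|)).sum := by
  unfold calculate_index_difference
  rw [foldA_eq]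
  show ((((PySem.List.enumerate arr 0).foldl pvStepA (PySem.Dict.empty, PySem.Dict.empty)).1.keys).map
      (fun num => |((PySem.List.enumerate arr 0).foldl pvStepA (PySem.Dict.empty, PySem.Dict.empty)).2.getD num 0
        - ((PySem.List.enumerate arr 0).foldl pvStepA (PySem.Dict.empty, PySem.Dict.empty)).1.getD num 0|)).sum
    = ((PySem.Set.ofList arr).map
        (fun v => |(pvOcc arr v).getLastD 0 - (pvOcc arr v).headD 0|)).sum
  have hkeys : ((PySem.List.enumerate arr 0).foldl pvStepA (PySem.Dict.empty, PySem.Dict.empty)).1.keys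
      = PySem.Set.ofList arr := by
    rw [foldA_fst_keys, PySem.Dict.keys_empty, PySem.Set.update_nil_left,
      PySem.List.map_snd_enumerate]
  rw [hkeys]
  apply congrArg
  apply List.map_congr_left
  intro v _
  have hA1 : ((PySem.List.enumerate arr 0).foldl pvStepA (PySem.Dict.empty, PySem.Dict.empty)).1.getD v 0
      = (pvOcc arr v).headD 0 := by
    rw [foldA_fst_getD, if_neg (by simp [PySem.Dict.contains_empty])]
    rfl
  have hA2 : ((PySem.List.enumerate arr 0).foldl pvStepA (PySem.Dict.empty, PySem.Dict.empty)).2.getD v 0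
      = (pvOcc arr v).getLastD 0 := by
    rw [foldA_snd_getD, PySem.Dict.getD_empty]
    rfl
  rw [hA1, hA2]

-- ===== VERDICT (by name: the statement is the Claim_ definition above) =====
theorem calculate_index_difference_spec : Claim_equal_calculate_index_difference := by
  intro n arr _
  show calculate_index_difference n arr = calculate_index_difference_alt n arr
  have hA : calculate_index_difference n arr = calculate_index_difference 0 arr := rfl
  have hB : calculate_index_difference_alt n arr = calculate_index_difference_alt 0 arr := rfl
  rw [hA, hB, A_characterization, foldB_characterization]
  apply congrArg
  apply List.map_congr_left
  intro v hv
  have hmem : v ∈ arr := (PySem.Set.mem_ofList arr v).mp hv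
  rw [sum_contrib (pvOcc arr v) (pvOcc_pairwise arr v),
    abs_of_nonneg (by have := head_le_last arr v hmem; omega)]
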